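-- pv_equiv track=rewrite | github.com/deviandinifebrianti/Sipresi_Pemkot | lancar/pemkot/sipreti/views.py | build_cumulative_freq
-- ===== SOURCE A (Python) =====
-- def build_cumulative_freq(freq_model):
--     """Build cumulative frequency table"""
--     symbols = sorted(freq_model.keys())
--     cumulative = {}
--     total = 0
--
--     for symbol in symbols:
--         cumulative[symbol] = total
--         total += freq_model[symbol]
--
--     return cumulative, total
-- ===== SOURCE B (Python) =====
-- def build_cumulative_freq(freq_model):
--     """Build cumulative frequency table (closed-form per symbol: no running accumulator)"""
--     cumulative = {s: sum(v for t, v in freq_model.items() if t < s)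
--                   for s in sorted(freq_model)}
--     return cumulative, sum(freq_model.values())
-- ===== Notes on version B (the rewrite author's own statement) =====
-- stated objective: alternative
-- what changed: Replaces A's running-total loop over sorted keys by a dict comprehension whose value for each symbol is a closed-form sum over the items with a strictly smaller key, with the total computed independently as sum(freq_model.values()).
import Mathlib
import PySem

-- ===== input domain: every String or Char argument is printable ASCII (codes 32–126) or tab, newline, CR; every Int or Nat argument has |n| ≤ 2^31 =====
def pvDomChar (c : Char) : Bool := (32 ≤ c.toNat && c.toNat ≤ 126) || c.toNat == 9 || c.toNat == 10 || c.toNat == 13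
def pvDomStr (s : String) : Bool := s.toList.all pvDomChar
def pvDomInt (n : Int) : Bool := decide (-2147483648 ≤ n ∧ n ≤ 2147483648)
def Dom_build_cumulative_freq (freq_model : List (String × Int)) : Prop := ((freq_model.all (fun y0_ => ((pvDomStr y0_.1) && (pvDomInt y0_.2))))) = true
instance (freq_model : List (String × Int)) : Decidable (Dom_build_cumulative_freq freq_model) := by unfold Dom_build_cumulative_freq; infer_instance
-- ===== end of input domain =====

-- B replaces A's running-total loop by a closed-form per-symbol sum (sum of all strictly smaller
-- keys' frequencies) built in one dict comprehension; objective: alternative (not faster).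

-- ===== PORT A =====
-- A: sort the dict's keys, then one loop carrying (cumulative dict, running total).
-- freq_model[symbol] is ported as getD … 0: symbol ∈ keys, so KeyError is impossible (exact).
def build_cumulative_freq (freq_model : List (String × Int)) : (List (String × Int)) × Int :=
  let d := PySem.Dict.ofList freq_model
  let symbols := PySem.List.sorted d.keys (fun x => x) false
  let r := symbols.foldl
    (fun (acc : PySem.Dict String Int × Int) symbol =>
      (acc.1.insert symbol acc.2, acc.2 + d.getD symbol 0))
    (PySem.Dict.empty, 0)
  (r.1.items, r.2)

-- ===== PORT B =====
-- B: dict comprehension over sorted keys, each value a generator-sum over the items with a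
-- strictly smaller key (ported as filter/map/sum); total = sum(freq_model.values()).
def build_cumulative_freq_alt (freq_model : List (String × Int)) : (List (String × Int)) × Int :=
  let d := PySem.Dict.ofList freq_model
  let cumulative := (PySem.List.sorted d.keys (fun x => x) false).foldl
    (fun (c : PySem.Dict String Int) s =>
      c.insert s (((d.items.filter (fun p => p.1 < s)).map (·.2)).sum))
    PySem.Dict.empty
  (cumulative.items, (d.items.map (·.2)).sum)

-- ===== PRECONDITION & SPEC =====
def Spec_build_cumulative_freq (freq_model : List (String × Int)) (out : (List (String × Int)) × Int) : Prop := out = build_cumulative_freq_alt freq_model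
instance (freq_model : List (String × Int)) (out : (List (String × Int)) × Int) : Decidable (Spec_build_cumulative_freq freq_model out) := by unfold Spec_build_cumulative_freq; infer_instance

-- ===== CLAIM (what is proved, stated in full; the proofs are below) =====
def Claim_equal_build_cumulative_freq : Prop := ∀ (freq_model : List (String × Int)), Dom_build_cumulative_freq freq_model → Spec_build_cumulative_freq freq_model (build_cumulative_freq freq_model)

-- ===== LEMMAS AND PROOFS =====

-- On a strictly sorted full list L = pre ++ l, A's loop over the suffix l starting from running
-- total (pre.map f).sum produces exactly B's per-symbol closed-form values, and the final total
-- is the sum over all of L.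
theorem pv_loop_lemma (f : String → Int) (L : List String) (hL : L.Pairwise (· < ·)) :
    ∀ (l pre : List String) (c : PySem.Dict String Int), pre ++ l = L →
    l.foldl (fun (acc : PySem.Dict String Int × Int) s => (acc.1.insert s acc.2, acc.2 + f s))
      (c, (pre.map f).sum)
    = (l.foldl (fun c s => c.insert s (((L.filter (fun t => t < s)).map f).sum)) c,
       (L.map f).sum) := by
  intro l
  induction l with
  | nil =>
    intro pre c h
    simp at h
    subst h
    simp
  | cons s l' ih =>
    intro pre c h
    have hfil : L.filter (fun t => t < s) = pre := by
      subst h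
      rw [List.filter_append]
      have hp := List.pairwise_append.mp hL
      have h1 : pre.filter (fun t => t < s) = pre := by
        apply List.filter_eq_self.mpr
        intro a ha
        simp only [decide_eq_true_eq]
        exact hp.2.2 a ha s (by simp)
      have h2 : (s :: l').filter (fun t => t < s) = [] := by
        apply List.filter_eq_nil_iff.mpr
        intro a ha
        simp only [decide_eq_true_eq]
        rcases List.mem_cons.mp ha with rfl | hmem
        · exact lt_irrefl a
        · exact not_lt_of_gt (List.pairwise_cons.mp hp.2.1 |>.1 a hmem)
      rw [h1, h2, List.append_nil]
    have hsum : (pre.map f).sum + f s = ((pre ++ [s]).map f).sum := by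
      simp
    simp only [List.foldl_cons]
    rw [hsum]
    rw [ih (pre ++ [s]) (c.insert s (pre.map f).sum) (by simpa using h)]
    rw [hfil]

-- sums of values: filtering the items list equals filtering the keys (keys of a dict are Nodup)
theorem pv_items_filter_sum (d : PySem.Dict String Int) (hnd : d.keys.Nodup)
    (p : String → Prop) [DecidablePred p] :
    ((d.items.filter (fun q => p q.1)).map (·.2)).sum
      = ((d.keys.filter (fun t => p t)).map (fun k => d.getD k 0)).sum := by
  rw [PySem.Dict.items_eq_map_keys d hnd 0]
  rw [List.filter_map, List.map_map]
  simp [Function.comp_def]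

theorem pv_main (freq_model : List (String × Int)) :
    build_cumulative_freq freq_model = build_cumulative_freq_alt freq_model := by
  unfold build_cumulative_freq build_cumulative_freq_alt
  dsimp only
  set d := PySem.Dict.ofList freq_model with hd
  set L := PySem.List.sorted d.keys (fun x => x) false with hLdef
  have hndk : d.keys.Nodup := PySem.Dict.nodup_keys_ofList freq_model
  have hperm : L.Perm d.keys := PySem.List.sorted_perm d.keys (fun x => x) false
  have hnd : L.Nodup := hperm.nodup_iff.mpr hndk
  have hle : L.Pairwise (· ≤ ·) := by
    have := PySem.List.sorted_pairwise d.keys (fun x => x)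
    simpa using this
  have hL : L.Pairwise (· < ·) :=
    (hle.and hnd).imp (fun {a b} hab => lt_of_le_of_ne hab.1 hab.2)
  have key := pv_loop_lemma (fun s => d.getD s 0) L hL L [] PySem.Dict.empty rfl
  simp only [List.map_nil, List.sum_nil] at key
  rw [key]
  refine Prod.ext ?_ ?_
  · dsimp only
    congr 1
    apply PySem.List.foldl_congr_mem
    intro c s hs
    congr 1
    rw [pv_items_filter_sum d hndk (fun t => t < s)]
    exact (((hperm.filter _).map (fun k => d.getD k 0)).sum_eq)
  · dsimp only
    have : d.items.map (·.2) = d.keys.map (fun k => d.getD k 0) := by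
      rw [PySem.Dict.items_eq_map_keys d hndk 0, List.map_map]
      rfl
    rw [this]
    exact ((hperm.map (fun k => d.getD k 0)).sum_eq)

-- ===== VERDICT (by name: the statement is the Claim_ definition above) =====
theorem build_cumulative_freq_spec : Claim_equal_build_cumulative_freq := by
  intro fm _
  unfold Spec_build_cumulative_freq
  exact pv_main fm
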